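-- pv_equiv track=rewrite | github.com/righthand0521/LeetCode | src/2940.py | search
-- ===== SOURCE A (Python) =====
-- def search(height, monoStack):
--     retVal = -1
--
--     left = 0
--     right = len(monoStack) - 1
--     while left <= right:
--         middle = (left + right) // 2
--         if monoStack[middle][0] > height:
--             retVal = max(retVal, middle)
--             left = middle + 1
--         else:
--             right = middle - 1
--
--     return retVal
-- ===== SOURCE B (Python) =====
-- def search(height, monoStack):
--     def go(seg, base):
--         if not seg:
--             return -1
--         m = (len(seg) - 1) // 2
--         if seg[m][0] > height:
--             return max(base + m, go(seg[m + 1:], base + m + 1))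
--         return go(seg[:m], base)
--     return go(monoStack, 0)
-- ===== Notes on version B (the rewrite author's own statement) =====
-- stated objective: alternative
-- what changed: The iterative index-based binary search with a mutable retVal accumulator is replaced by a recursion over list slices: a helper receives the current sublist plus a base offset, picks its middle element by local index (len(seg)-1)//2, and returns max(base+m, recurse on the right slice) or recurses on the left slice, with no indices into the original list and no accumulator.
import Mathlib
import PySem

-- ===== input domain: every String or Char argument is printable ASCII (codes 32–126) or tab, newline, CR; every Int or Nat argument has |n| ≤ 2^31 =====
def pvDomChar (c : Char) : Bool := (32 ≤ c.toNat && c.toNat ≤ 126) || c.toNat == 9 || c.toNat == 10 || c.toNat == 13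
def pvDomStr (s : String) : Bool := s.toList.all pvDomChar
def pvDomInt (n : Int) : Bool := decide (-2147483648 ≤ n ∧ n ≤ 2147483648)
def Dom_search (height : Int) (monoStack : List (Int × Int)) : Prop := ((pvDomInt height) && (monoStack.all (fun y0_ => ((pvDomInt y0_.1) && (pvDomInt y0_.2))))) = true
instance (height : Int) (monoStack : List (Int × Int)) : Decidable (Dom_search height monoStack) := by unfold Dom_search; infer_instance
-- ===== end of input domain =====

-- B replaces the iterative, index-based binary search with retVal accumulator by a
-- recursion over list slices carrying only a base offset; same comparisons, same result.

-- ===== PORT A =====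
-- A's while-loop, state (left, right, retVal); the index read uses pyGet? (always in
-- range when started from left = 0), defaulting harmlessly as the loop never hits none
def searchLoop (height : Int) (monoStack : List (Int × Int)) (left right retVal : Int) : Int :=
  if h : left ≤ right then
    let middle := PySem.Int.floordiv (left + right) 2
    if (((PySem.List.pyGet? monoStack middle).getD (0, 0)).1 > height) then
      searchLoop height monoStack (middle + 1) right (max retVal middle)
    else
      searchLoop height monoStack left (middle - 1) retVal
  else retVal
termination_by (right + 1 - left).toNat
decreasing_by
  · have := PySem.Int.floordiv_two_mid_bounds h; omega
  · have := PySem.Int.floordiv_two_mid_bounds h; omega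

def search (height : Int) (monoStack : List (Int × Int)) : Int :=
  searchLoop height monoStack 0 ((monoStack.length : Int) - 1) (-1)

-- ===== PORT B =====
-- Source B's helper go(seg, base): recursion on the slice; seg[m+1:] / seg[:m] become
-- List.drop / List.take (exact for these in-range nonnegative bounds), seg[m] a getD read
def searchSeg (height : Int) (seg : List (Int × Int)) (base : Int) : Int :=
  if hne : seg = [] then -1
  else
    let m := (seg.length - 1) / 2
    if (seg.getD m (0, 0)).1 > height then
      max (base + (m : Int)) (searchSeg height (seg.drop (m + 1)) (base + (m : Int) + 1))
    else
      searchSeg height (seg.take m) base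
termination_by seg.length
decreasing_by
  · have : 0 < seg.length := List.length_pos_iff.mpr hne
    simp; omega
  · have : 0 < seg.length := List.length_pos_iff.mpr hne
    simp [List.length_take]; omega

def search_alt (height : Int) (monoStack : List (Int × Int)) : Int :=
  searchSeg height monoStack 0

-- ===== PRECONDITION & SPEC =====
def Spec_search (height : Int) (monoStack : List (Int × Int)) (out : Int) : Prop := out = search_alt height monoStack
instance (height : Int) (monoStack : List (Int × Int)) (out : Int) : Decidable (Spec_search height monoStack out) := by unfold Spec_search; infer_instance

-- ===== CLAIM (what is proved, stated in full; the proofs are below) =====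
def Claim_equal_search : Prop := ∀ (height : Int) (monoStack : List (Int × Int)), Dom_search height monoStack → Spec_search height monoStack (search height monoStack)

-- ===== LEMMAS AND PROOFS =====

-- the midpoint (left+right)//2, for 0 ≤ left ≤ right, is left plus half the gap
theorem floordiv_mid_eq (left right : Int) (_h0 : 0 ≤ left) (h : left ≤ right) :
    PySem.Int.floordiv (left + right) 2 = left + ((right - left).toNat / 2 : Nat) := by
  rw [PySem.Int.floordiv_eq_iff_of_pos (by omega)]
  omega

-- A's loop on interval [left, right] equals max of the accumulator and B's recursion
-- on the corresponding slice of the list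
theorem searchLoop_eq_seg (height : Int) (monoStack : List (Int × Int))
    (n : Nat) (left right retVal : Int) (h0 : 0 ≤ left) (hub : right < (monoStack.length : Int))
    (hn : (n : Int) = right + 1 - left) (hr : -1 ≤ retVal) :
    searchLoop height monoStack left right retVal =
      max retVal (searchSeg height ((monoStack.drop left.toNat).take n) left) := by
  by_cases h : left ≤ right
  · have hn1 : 1 ≤ n := by omega
    have hslen : ((monoStack.drop left.toNat).take n).length = n := by
      simp [List.length_take, List.length_drop]; omega
    have hne : (monoStack.drop left.toNat).take n ≠ [] := by
      intro hc; rw [hc] at hslen; simp at hslen; omega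
    have hmdef : (((monoStack.drop left.toNat).take n).length - 1) / 2 = (n - 1) / 2 := by
      rw [hslen]
    have hmid : PySem.Int.floordiv (left + right) 2 = left + ((n - 1) / 2 : Nat) := by
      rw [floordiv_mid_eq left right h0 h]
      have : (right - left).toNat / 2 = (n - 1) / 2 := by omega
      rw [this]
    have hmn : (n - 1) / 2 < n := by omega
    have hget : (PySem.List.pyGet? monoStack (left + ((n - 1) / 2 : Nat))).getD (0, 0) =
        ((monoStack.drop left.toNat).take n).getD ((n - 1) / 2) (0, 0) := by
      have h1 : left + ((n - 1) / 2 : Nat) = ((left.toNat + (n - 1) / 2 : Nat) : Int) := by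
        push_cast; omega
      rw [h1, PySem.List.pyGet?_natCast]
      simp [List.getD, hmn, List.getElem?_drop]
    rw [searchLoop]
    simp only [dif_pos h, hmid, hget]
    conv_rhs => rw [searchSeg]
    simp only [dif_neg hne, hmdef]
    split_ifs with hc
    · rw [searchLoop_eq_seg height monoStack (n - (n - 1) / 2 - 1)
        (left + ((n - 1) / 2 : Nat) + 1) right
        (max retVal (left + ((n - 1) / 2 : Nat))) (by omega) hub (by push_cast; omega) (by omega)]
      have e1 : (left + ((n - 1) / 2 : Nat) + 1).toNat = left.toNat + ((n - 1) / 2 + 1) := by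
        omega
      have e2 : n - (n - 1) / 2 - 1 = n - ((n - 1) / 2 + 1) := by omega
      have hdrop : ((monoStack.drop left.toNat).take n).drop ((n - 1) / 2 + 1) =
          (monoStack.drop (left + ((n - 1) / 2 : Nat) + 1).toNat).take (n - (n - 1) / 2 - 1) := by
        rw [List.drop_take, List.drop_drop, e1, e2]
      rw [hdrop, max_assoc]
    · rw [searchLoop_eq_seg height monoStack ((n - 1) / 2) left
        (left + ((n - 1) / 2 : Nat) - 1) retVal h0 (by omega) (by push_cast; omega) hr]
      have e3 : min ((n - 1) / 2) n = (n - 1) / 2 := by omega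
      have htake : ((monoStack.drop left.toNat).take n).take ((n - 1) / 2) =
          (monoStack.drop left.toNat).take ((n - 1) / 2) := by
        rw [List.take_take, e3]
      rw [htake]
  · have hn0 : n = 0 := by omega
    rw [searchLoop]
    simp only [dif_neg h]
    rw [hn0]
    simp only [List.take_zero]
    rw [searchSeg]
    simp
    omega
termination_by n
decreasing_by
  · omega
  · omega

theorem searchSeg_ge (height : Int) (seg : List (Int × Int)) (base : Int) (hb : 0 ≤ base) :
    -1 ≤ searchSeg height seg base := by
  by_cases hne : seg = []
  · rw [searchSeg]; simp [hne]
  · rw [searchSeg]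
    simp only [dif_neg hne]
    split_ifs with hc
    · have := le_max_left (base + ((seg.length - 1) / 2 : Nat) : Int)
        (searchSeg height (seg.drop ((seg.length - 1) / 2 + 1)) (base + ((seg.length - 1) / 2 : Nat) + 1))
      omega
    · exact searchSeg_ge height (seg.take ((seg.length - 1) / 2)) base hb
termination_by seg.length
decreasing_by
  · have : 0 < seg.length := List.length_pos_iff.mpr hne
    simp [List.length_take]; omega

-- ===== VERDICT (by name: the statement is the Claim_ definition above) =====
theorem search_spec : Claim_equal_search := by
  intro height monoStack _
  unfold Spec_search search search_alt
  rcases List.eq_nil_or_concat monoStack with h | _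
  · subst h; simp [searchLoop, searchSeg]
  · rw [searchLoop_eq_seg height monoStack monoStack.length 0 ((monoStack.length : Int) - 1) (-1)
      (by omega) (by omega) (by omega) (by omega)]
    simp only [Int.toNat_zero, List.drop_zero, List.take_length]
    have := searchSeg_ge height monoStack 0 (by omega)
    omega
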